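-- pv_equiv track=rewrite | github.com/abelsensors/LicensePlateRecognition-YOLOv4-TesseractOCR | prespective_rectification/abrupt_corners.py | get_corners_abrupt_changes
-- ===== SOURCE A (Python) =====
-- def get_corners_abrupt_changes(cumulative_difference):
--     flag_off = True
--     total_cumulative = []
--     for i, element in enumerate(cumulative_difference):
--
--         if not element:
--
--             if flag_off:
--                 current_cumulative = []
--                 counter = 0
--
--                 for series_contigous in cumulative_difference[i:]:
--                     if series_contigous:
--                         break
--                     counter += 1
--
--                     current_cumulative.append(i + counter)
--                 total_cumulative.append(current_cumulative)
--                 flag_off = False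
--         else:
--             flag_off = True
--     total_cumulative = sorted(total_cumulative, key=lambda l: (len(l), l))
--     quadratic_changes = []
--
--     for change in total_cumulative[-2:]:
--         quadratic_changes.extend([change[0], change[len(change) - 1]])
--     quadratic_changes.sort()
--
--     return quadratic_changes
-- ===== SOURCE B (Python) =====
-- def get_corners_abrupt_changes(cumulative_difference):
--     # One linear pass: collect each maximal zero-run as (length, start+1, end).
--     runs = []
--     start = None
--     for i, x in enumerate(cumulative_difference):
--         if x:
--             if start is not None:
--                 runs.append((i - start, start + 1, i))
--                 start = None
--         else:
--             if start is None:
--                 start = i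
--     if start is not None:
--         n = len(cumulative_difference)
--         runs.append((n - start, start + 1, n))
--     runs.sort(key=lambda r: (r[0], r[1]))
--     result = []
--     for _, s, e in runs[-2:]:
--         result.extend([s, e])
--     result.sort()
--     return result
-- ===== Notes on version B (the rewrite author's own statement) =====
-- stated objective: alternative
-- what changed: B replaces A's flag-driven loop with a nested lookahead scan (which re-reads cumulative_difference[i:] at each run start and builds the full index list of every zero-run, later sorted by the (len, list) tuple key) by a single start/end-tracking pass that records each maximal zero-run as a (length, start, end) triple, sorts the triples by (length, start), and reads the corners off the last two triples.
import Mathlib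
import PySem

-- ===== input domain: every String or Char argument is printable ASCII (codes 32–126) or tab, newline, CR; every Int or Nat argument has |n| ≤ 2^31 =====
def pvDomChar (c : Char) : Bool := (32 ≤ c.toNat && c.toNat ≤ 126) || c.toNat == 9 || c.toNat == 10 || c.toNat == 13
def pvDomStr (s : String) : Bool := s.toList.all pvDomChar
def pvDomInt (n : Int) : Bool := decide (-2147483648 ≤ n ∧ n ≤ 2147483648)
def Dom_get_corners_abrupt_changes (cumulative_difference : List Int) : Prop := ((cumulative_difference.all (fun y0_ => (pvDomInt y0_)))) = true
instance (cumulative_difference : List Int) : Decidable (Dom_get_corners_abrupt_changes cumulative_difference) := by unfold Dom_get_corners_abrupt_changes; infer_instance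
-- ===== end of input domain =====

-- ===== PORT A =====
-- B replaces A's nested lookahead (a fresh inner scan of cumulative_difference[i:] at each run
-- start, building full index lists) by one start/end-tracking pass that records each zero-run
-- as a (length, start, end) triple; same cost, different structure (objective: alternative).
-- A-side helper: the inner 'for series_contigous in cumulative_difference[i:]' loop
-- (break on truthy; counter += 1; current.append(i + counter)).
def pvInnerA (i : Int) : List Int → Int → List Int
  | [], _ => []
  | x :: xs, counter =>
    if x != 0 then []
    else (i + (counter + 1)) :: pvInnerA i xs (counter + 1)

-- A-side helper: one iteration of A's main loop; state = (flag_off, total_cumulative).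
def pvStepA (cd : List Int) (st : Bool × List (List Int)) (p : Int × Int) : Bool × List (List Int) :=
  if p.2 == 0 then
    if st.1 then
      (false, st.2 ++ [pvInnerA p.1 (PySem.List.slice cd (some p.1) none) 0])
    else st
  else (true, st.2)

def get_corners_abrupt_changes (cumulative_difference : List Int) : List Int :=
  let st := (PySem.List.enumerate cumulative_difference 0).foldl
    (pvStepA cumulative_difference) (true, ([] : List (List Int)))
  let total := PySem.List.sorted2 st.2 (fun l => l.length) (fun l => l) false
  -- change[0] and change[len(change)-1]: every list in total_cumulative is nonempty (a run
  -- holds at least one index), so Python never raises here; pyGetD's default is unreachable.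
  let quadratic := (PySem.List.slice total (some (-2)) none).foldl
    (fun acc change =>
      acc ++ [PySem.List.pyGetD change 0 0,
              PySem.List.pyGetD change ((change.length : Int) - 1) 0]) []
  PySem.List.sorted quadratic (fun x => x) false

-- ===== PORT B =====
-- B-side helper: one iteration of B's single pass; state = (start, runs).
def pvStepB (st : Option Int × List (Int × Int × Int)) (p : Int × Int) :
    Option Int × List (Int × Int × Int) :=
  if p.2 != 0 then
    match st.1 with
    | some s => (none, st.2 ++ [(p.1 - s, s + 1, p.1)])
    | none => st
  else
    match st.1 with
    | none => (some p.1, st.2)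
    | some _ => st

-- B-side helper: the trailing 'if start is not None: runs.append((n - start, start + 1, n))'.
def pvFinal (n : Int) (st : Option Int × List (Int × Int × Int)) : List (Int × Int × Int) :=
  match st.1 with
  | some s => st.2 ++ [(n - s, s + 1, n)]
  | none => st.2

def get_corners_abrupt_changes_alt (cumulative_difference : List Int) : List Int :=
  let st := (PySem.List.enumerate cumulative_difference 0).foldl pvStepB
    (none, ([] : List (Int × Int × Int)))
  let runs := pvFinal (cumulative_difference.length : Int) st
  let sruns := PySem.List.sorted2 runs (fun r => r.1) (fun r => r.2.1) false
  let result := (PySem.List.slice sruns (some (-2)) none).foldl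
    (fun acc r => acc ++ [r.2.1, r.2.2]) []
  PySem.List.sorted result (fun x => x) false

-- ===== PRECONDITION & SPEC =====
def Spec_get_corners_abrupt_changes (cumulative_difference : List Int) (out : List Int) : Prop := out = get_corners_abrupt_changes_alt cumulative_difference
instance (cumulative_difference : List Int) (out : List Int) : Decidable (Spec_get_corners_abrupt_changes cumulative_difference out) := by unfold Spec_get_corners_abrupt_changes; infer_instance

-- ===== CLAIM (what is proved, stated in full; the proofs are below) =====
def Claim_equal_get_corners_abrupt_changes : Prop := ∀ (cumulative_difference : List Int), Dom_get_corners_abrupt_changes cumulative_difference → Spec_get_corners_abrupt_changes cumulative_difference (get_corners_abrupt_changes cumulative_difference)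

-- ===== LEMMAS AND PROOFS =====

-- Proof-side view of a run triple (length, start, end): the index list A builds for it.
def pvToL (r : Int × Int × Int) : List Int :=
  (List.range r.1.toNat).map (fun (k : Nat) => r.2.1 + (k : Int))

-- A run triple produced by B: positive length and end = start + length - 1.
def pvValid (r : Int × Int × Int) : Prop :=
  1 ≤ r.1 ∧ r.2.2 = r.2.1 + r.1 - 1

lemma pvInnerA_char (c : Nat) (i counter : Int) (rest : List Int)
    (hrest : rest.head?.all (fun y => y != 0) = true) :
    pvInnerA i (List.replicate c 0 ++ rest) counter
      = (List.range c).map (fun (k : Nat) => i + counter + 1 + (k : Int)) := by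
  induction c generalizing counter with
  | zero =>
    simp only [List.replicate_zero, List.nil_append, List.range_zero]
    cases rest with
    | nil => rfl
    | cons y t =>
      simp only [Option.all_some, List.head?_cons] at hrest
      simp [pvInnerA, hrest]
  | succ c ih =>
    rw [List.replicate_succ, List.cons_append]
    have hstep : pvInnerA i (0 :: (List.replicate c 0 ++ rest)) counter
        = (i + (counter + 1)) :: pvInnerA i (List.replicate c 0 ++ rest) (counter + 1) := by
      simp [pvInnerA]
    rw [hstep, ih (counter + 1), List.range_succ_eq_map, List.map_cons, List.map_map]
    congr 1
    · push_cast; ring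
    · apply List.map_congr_left
      intro k _
      simp only [Function.comp_apply]
      push_cast; ring

lemma pvRun_eq (cd : List Int) (s j : Nat) (hsj : s < j) (rest : List Int)
    (hrest : rest.head?.all (fun y => y != 0) = true)
    (hdrop : cd.drop s = List.replicate (j - s) 0 ++ rest) :
    pvInnerA (s : Int) (cd.drop s) 0 = pvToL ((j : Int) - (s : Int), (s : Int) + 1, (j : Int)) := by
  rw [hdrop, pvInnerA_char (j - s) (s : Int) 0 rest hrest]
  unfold pvToL
  have h1 : ((j : Int) - (s : Int)).toNat = j - s := by omega
  simp only [h1]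
  apply List.map_congr_left
  intro k _
  ring

lemma pvCorr (cd : List Int) :
    ∀ (ys : List Int) (j : Nat), ys = cd.drop j →
    ∀ (runs : List (Int × Int × Int)) (stA : Bool × List (List Int))
      (stB : Option Int × List (Int × Int × Int)),
      stB.2 = runs →
      (∀ r ∈ runs, pvValid r) →
      ((stA.1 = true ∧ stB.1 = none ∧ stA.2 = runs.map pvToL) ∨
       (∃ s : Nat, stA.1 = false ∧ stB.1 = some (s : Int) ∧ s < j ∧
          cd.drop s = List.replicate (j - s) 0 ++ ys ∧
          stA.2 = runs.map pvToL ++ [pvInnerA (s : Int) (cd.drop s) 0])) →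
      ((PySem.List.enumerate ys (j : Int)).foldl (pvStepA cd) stA).2
          = (pvFinal (cd.length : Int) ((PySem.List.enumerate ys (j : Int)).foldl pvStepB stB)).map pvToL
        ∧ ∀ r ∈ pvFinal (cd.length : Int) ((PySem.List.enumerate ys (j : Int)).foldl pvStepB stB), pvValid r := by
  intro ys
  induction ys with
  | nil =>
    intro j hys runs stA stB hstB hval hinv
    rw [PySem.List.enumerate_nil, List.foldl_nil, List.foldl_nil]
    rcases hinv with ⟨hfa, hsb, hta⟩ | ⟨s, hfa, hsb, hsj, hdrop, hta⟩
    · refine ⟨?_, ?_⟩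
      · simp only [pvFinal, hsb]
        rw [hta, hstB]
      · intro r hr
        simp only [pvFinal, hsb] at hr
        rw [hstB] at hr
        exact hval r hr
    · have hLj : cd.length ≤ j := List.drop_eq_nil_iff.1 hys.symm
      have hlen1 := congrArg List.length hdrop
      simp only [List.length_drop, List.length_append, List.length_replicate,
        List.length_nil, Nat.add_zero] at hlen1
      have hL : cd.length = j := by omega
      have htr : pvInnerA (s : Int) (cd.drop s) 0
          = pvToL ((cd.length : Int) - (s : Int), (s : Int) + 1, (cd.length : Int)) := by
        rw [hL]
        exact pvRun_eq cd s j hsj [] rfl (by simpa using hdrop)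
      refine ⟨?_, ?_⟩
      · simp only [pvFinal, hsb, hstB]
        rw [List.map_append, hta, htr]
        rfl
      · intro r hr
        simp only [pvFinal, hsb, hstB, List.mem_append, List.mem_singleton] at hr
        rcases hr with hr | hr
        · exact hval r hr
        · subst hr
          constructor
          · simp only []
            omega
          · simp only []
            ring
  | cons y ys' ih =>
    intro j hys runs stA stB hstB hval hinv
    have hdropj1 : ys' = cd.drop (j + 1) := by
      rw [← List.tail_drop, ← hys]
      rfl
    rw [PySem.List.enumerate_cons, List.foldl_cons, List.foldl_cons]
    have hjcast : (j : Int) + 1 = ((j + 1 : Nat) : Int) := by push_cast; ring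
    rw [hjcast]
    rcases hinv with ⟨hfa, hsb, hta⟩ | ⟨s, hfa, hsb, hsj, hdrop, hta⟩
    · by_cases hy : y = 0
      · -- a run opens at index j
        have hsA : pvStepA cd stA ((j : Int), y)
            = (false, stA.2 ++ [pvInnerA (j : Int) (PySem.List.slice cd (some (j : Int)) none) 0]) := by
          simp [pvStepA, hy, hfa]
        have hsB : pvStepB stB ((j : Int), y) = (some (j : Int), stB.2) := by
          simp [pvStepB, hy, hsb]
        rw [hsA, hsB]
        apply ih (j + 1) hdropj1 runs _ (some (j : Int), stB.2) hstB hval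
        right
        refine ⟨j, rfl, rfl, by omega, ?_, ?_⟩
        · have h1 : j + 1 - j = 1 := by omega
          rw [h1, ← hys]
          simp [hy]
        · simp only []
          rw [hta, PySem.List.slice_from_natCast]
      · -- truthy element, stay closed
        have hsA : pvStepA cd stA ((j : Int), y) = (true, stA.2) := by
          simp [pvStepA, hy]
        have hsB : pvStepB stB ((j : Int), y) = stB := by
          simp [pvStepB, hy, hsb]
        rw [hsA, hsB]
        exact ih (j + 1) hdropj1 runs _ _ hstB hval (Or.inl ⟨rfl, hsb, by simpa using hta⟩)
    · by_cases hy : y = 0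
      · -- inside an open run, another zero
        have hsA : pvStepA cd stA ((j : Int), y) = stA := by
          simp [pvStepA, hy, hfa]
        have hsB : pvStepB stB ((j : Int), y) = stB := by
          simp [pvStepB, hy, hsb]
        rw [hsA, hsB]
        apply ih (j + 1) hdropj1 runs stA stB hstB hval
        right
        refine ⟨s, hfa, hsb, by omega, ?_, hta⟩
        have h1 : j + 1 - s = (j - s) + 1 := by omega
        rw [h1, List.replicate_succ', List.append_assoc, hdrop]
        simp [hy]
      · -- truthy element closes the open run
        have hsA : pvStepA cd stA ((j : Int), y) = (true, stA.2) := by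
          simp [pvStepA, hy]
        have hsB : pvStepB stB ((j : Int), y)
            = (none, stB.2 ++ [((j : Int) - (s : Int), (s : Int) + 1, (j : Int))]) := by
          simp [pvStepB, hy, hsb]
        rw [hsA, hsB]
        have htr : pvInnerA (s : Int) (cd.drop s) 0
            = pvToL ((j : Int) - (s : Int), (s : Int) + 1, (j : Int)) :=
          pvRun_eq cd s j hsj (y :: ys') (by simp [hy]) hdrop
        apply ih (j + 1) hdropj1 (runs ++ [((j : Int) - (s : Int), (s : Int) + 1, (j : Int))]) _
          (none, stB.2 ++ [((j : Int) - (s : Int), (s : Int) + 1, (j : Int))])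
          (by rw [hstB])
        · intro r hr
          rcases List.mem_append.1 hr with hr | hr
          · exact hval r hr
          · rw [List.mem_singleton] at hr
            subst hr
            refine ⟨by simp only []; omega, by simp only []; ring⟩
        · left
          refine ⟨rfl, rfl, ?_⟩
          rw [List.map_append, hta, htr]
          rfl

lemma pvInsertBy_map {α β : Type} (f : α → β) (P : α → Prop) (p : β → β → Bool) (q : α → α → Bool)
    (hpq : ∀ a b, P a → P b → p (f a) (f b) = q a b) (x : α) (hx : P x) :
    ∀ (ys : List α), (∀ y ∈ ys, P y) →
    PySem.List.insertBy p (f x) (ys.map f) = (PySem.List.insertBy q x ys).map f := by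
  intro ys hys
  induction ys with
  | nil => simp [PySem.List.insertBy]
  | cons y t ih =>
    simp only [List.map_cons, PySem.List.insertBy,
      hpq x y hx (hys y (List.mem_cons_self ..))]
    by_cases hq : q x y = true
    · simp [hq]
    · simp only [Bool.not_eq_true] at hq
      simp only [hq, Bool.false_eq_true, if_false, List.map_cons]
      rw [ih (fun a ha => hys a (List.mem_cons_of_mem _ ha))]

lemma pvFoldlInsertBy_map {α β : Type} (f : α → β) (P : α → Prop) (p : β → β → Bool) (q : α → α → Bool)
    (hpq : ∀ a b, P a → P b → p (f a) (f b) = q a b) :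
    ∀ (xs acc : List α), (∀ a ∈ xs, P a) → (∀ a ∈ acc, P a) →
    (xs.map f).foldl (fun acc2 z => PySem.List.insertBy p z acc2) (acc.map f)
      = (xs.foldl (fun acc2 z => PySem.List.insertBy q z acc2) acc).map f := by
  intro xs
  induction xs with
  | nil => intro acc _ _; rfl
  | cons x t ih =>
    intro acc hxs hacc
    simp only [List.map_cons, List.foldl_cons]
    rw [pvInsertBy_map f P p q hpq x (hxs x (List.mem_cons_self ..)) acc hacc]
    exact ih (PySem.List.insertBy q x acc)
      (fun a ha => hxs a (List.mem_cons_of_mem _ ha))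
      (fun a ha => by
        rcases (PySem.List.mem_insertBy q x a acc).1 ha with h | h
        · exact h ▸ hxs x (List.mem_cons_self ..)
        · exact hacc a h)

lemma pvToL_lt (c : Nat) : ∀ (s s' : Int),
    ((List.range (c + 1)).map (fun (k : Nat) => s + (k : Int)) < (List.range (c + 1)).map (fun (k : Nat) => s' + (k : Int)))
      ↔ s < s' := by
  intro s s'
  induction c generalizing s s' with
  | zero =>
    simp only [List.range_succ_eq_map, List.range_zero, List.map_nil, List.map_cons,
      List.cons_lt_cons_iff]
    constructor
    · rintro (h | ⟨-, h⟩)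
      · omega
      · exact absurd h (List.not_lt_nil [])
    · intro h
      left
      omega
  | succ c ih =>
    rw [List.range_succ_eq_map, List.map_cons, List.map_cons,
      List.map_map, List.map_map, List.cons_lt_cons_iff]
    have hmap : ∀ (u : Int),
        (List.range (c + 1)).map ((fun (k : Nat) => u + (k : Int)) ∘ Nat.succ)
          = (List.range (c + 1)).map (fun (k : Nat) => (u + 1) + (k : Int)) := by
      intro u
      apply List.map_congr_left
      intro k _
      simp only [Function.comp_apply]
      push_cast; ring
    rw [hmap s, hmap s', ih (s + 1) (s' + 1)]
    constructor
    · rintro (h | ⟨-, h⟩) <;> omega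
    · intro h; left; omega

lemma pvCmp (a b : Int × Int × Int) (ha : pvValid a) (hb : pvValid b) :
    (decide ((pvToL a).length < (pvToL b).length)
      || (!decide ((pvToL b).length < (pvToL a).length) && decide (pvToL a < pvToL b)))
    = (decide (a.1 < b.1) || (!decide (b.1 < a.1) && decide (a.2.1 < b.2.1))) := by
  obtain ⟨ha1, -⟩ := ha
  obtain ⟨hb1, -⟩ := hb
  have hlen : ∀ r : Int × Int × Int, (pvToL r).length = r.1.toNat := by
    intro r; simp [pvToL]
  by_cases h1 : a.1 < b.1
  · have : (pvToL a).length < (pvToL b).length := by rw [hlen, hlen]; omega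
    simp [h1, this]
  · by_cases h2 : b.1 < a.1
    · have h3 : ¬ (pvToL a).length < (pvToL b).length := by rw [hlen, hlen]; omega
      have h4 : (pvToL b).length < (pvToL a).length := by rw [hlen, hlen]; omega
      simp [h1, h2, h3, h4]
    · have heq : a.1 = b.1 := by omega
      have h3 : ¬ (pvToL a).length < (pvToL b).length := by rw [hlen, hlen]; omega
      have h4 : ¬ (pvToL b).length < (pvToL a).length := by rw [hlen, hlen]; omega
      have hc : a.1.toNat = (a.1.toNat - 1) + 1 := by omega
      have hlt : (pvToL a < pvToL b) ↔ a.2.1 < b.2.1 := by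
        unfold pvToL
        rw [← heq, hc]
        exact pvToL_lt (a.1.toNat - 1) a.2.1 b.2.1
      simp [h1, h2, h3, h4, hlt]

lemma pvSort_map (runs : List (Int × Int × Int)) (hv : ∀ r ∈ runs, pvValid r) :
    PySem.List.sorted2 (runs.map pvToL) (fun l => l.length) (fun l => l) false
      = (PySem.List.sorted2 runs (fun r => r.1) (fun r => r.2.1) false).map pvToL := by
  simp only [PySem.List.sorted2, Bool.false_eq_true, if_false]
  have := pvFoldlInsertBy_map pvToL pvValid
    (fun l1 l2 => decide (l1.length < l2.length)
      || (!decide (l2.length < l1.length) && decide (l1 < l2)))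
    (fun a b => decide (a.1 < b.1) || (!decide (b.1 < a.1) && decide (a.2.1 < b.2.1)))
    (fun a b ha hb => pvCmp a b ha hb)
    runs [] hv (by simp)
  simpa using this

lemma pvExtract (r : Int × Int × Int) (hr : pvValid r) :
    [PySem.List.pyGetD (pvToL r) 0 0,
     PySem.List.pyGetD (pvToL r) (((pvToL r).length : Int) - 1) 0] = [r.2.1, r.2.2] := by
  obtain ⟨hr1, hr2⟩ := hr
  have hlen : (pvToL r).length = r.1.toNat := by simp [pvToL]
  have hpos : 0 < (pvToL r).length := by omega
  rw [PySem.List.pyGetD_eq_getElem (pvToL r) (i := 0) 0 le_rfl (by exact_mod_cast hpos),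
      PySem.List.pyGetD_eq_getElem (pvToL r) (i := ((pvToL r).length : Int) - 1) 0
        (by omega) (by omega)]
  have hToL : pvToL r = (List.range r.1.toNat).map (fun (k : Nat) => r.2.1 + (k : Int)) := rfl
  have ht1 : ((r.1.toNat : Int) - 1).toNat = r.1.toNat - 1 := by omega
  simp only [hToL, List.length_map, List.length_range, Int.toNat_zero, ht1,
    List.getElem_map, List.getElem_range, List.cons.injEq, and_true]
  refine ⟨by simp, ?_⟩
  rw [hr2]
  omega

-- ===== VERDICT (by name: the statement is the Claim_ definition above) =====
theorem get_corners_abrupt_changes_spec : Claim_equal_get_corners_abrupt_changes := by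
  intro cd _
  unfold Spec_get_corners_abrupt_changes
  unfold get_corners_abrupt_changes get_corners_abrupt_changes_alt
  dsimp only
  obtain ⟨h1, h2⟩ := pvCorr cd cd 0 rfl [] (true, []) (none, []) rfl
    (by intro r hr; simp at hr) (Or.inl ⟨rfl, rfl, rfl⟩)
  simp only [Nat.cast_zero] at h1 h2
  rw [h1]
  rw [pvSort_map _ h2]
  have hvalSB : ∀ r ∈ PySem.List.sorted2
      (pvFinal (cd.length : Int) ((PySem.List.enumerate cd 0).foldl pvStepB (none, [])))
      (fun r => r.1) (fun r => r.2.1) false, pvValid r := by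
    intro r hr
    exact h2 r ((PySem.List.sorted2_perm _ _ _ _).mem_iff.1 hr)
  set SB := PySem.List.sorted2
      (pvFinal (cd.length : Int) ((PySem.List.enumerate cd 0).foldl pvStepB (none, [])))
      (fun r => r.1) (fun r => r.2.1) false with hSB
  rw [PySem.List.slice_from_neg_ofNat (SB.map pvToL) 2 (by norm_num),
      PySem.List.slice_from_neg_ofNat SB 2 (by norm_num),
      List.length_map, ← List.map_drop, List.foldl_map]
  congr 1
  apply PySem.List.foldl_congr_mem
  intro acc r hr
  have hrv : pvValid r := hvalSB r (List.mem_of_mem_drop hr)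
  rw [pvExtract r hrv]
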